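-- pv_equiv track=rewrite | github.com/smaaland/python-sandbox | adventofcode/2023/day13.py | get_horizontal_mirrors
-- ===== SOURCE A (Python) =====
-- def get_horizontal_mirrors(_pattern):
--     horizontal_intersections = []
--     for i in range(1, len(_pattern)):
--         start = _pattern[:i][::-1]
--         end = _pattern[i:]
--         if all(x == y for x, y in zip(start, end)):
--             horizontal_intersections.append(i)
--     return horizontal_intersections
-- ===== SOURCE B (Python) =====
-- def get_horizontal_mirrors(_pattern):
--     n = len(_pattern)
--     mirrors = []
--     for i in range(1, n):
--         seg = _pattern[:2 * i] if 2 * i <= n else _pattern[2 * i - n:]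
--         if seg == seg[::-1]:
--             mirrors.append(i)
--     return mirrors
-- ===== Notes on version B (the rewrite author's own statement) =====
-- stated objective: alternative
-- what changed: Instead of reversing the prefix and comparing it elementwise against the suffix with a zip generator, B tests whether the boundary-touching even-length slice around each candidate axis equals its own reverse.
import Mathlib
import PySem

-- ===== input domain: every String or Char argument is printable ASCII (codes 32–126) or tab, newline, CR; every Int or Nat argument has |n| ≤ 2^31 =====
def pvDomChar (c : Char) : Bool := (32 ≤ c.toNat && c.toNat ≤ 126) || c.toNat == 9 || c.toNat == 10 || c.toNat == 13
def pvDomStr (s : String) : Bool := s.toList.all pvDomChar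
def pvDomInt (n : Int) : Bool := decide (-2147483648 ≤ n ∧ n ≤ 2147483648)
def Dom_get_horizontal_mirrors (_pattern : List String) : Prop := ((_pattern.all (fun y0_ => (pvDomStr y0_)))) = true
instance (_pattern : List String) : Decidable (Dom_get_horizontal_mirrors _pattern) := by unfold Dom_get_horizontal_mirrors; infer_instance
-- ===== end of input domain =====

-- B replaces A's reversed-prefix vs suffix elementwise zip comparison with a direct
-- palindrome test of the boundary-touching even-length slice (alternative decomposition, same cost).

-- ===== PORT A =====
-- _pattern[:i][::-1] : slice then reverse (PySem.List.slice?_none_none_neg_one: [::-1] is reverse)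
def get_horizontal_mirrors (_pattern : List String) : List Int :=
  (PySem.List.pyRange 1 (_pattern.length : Int) 1).foldl
    (fun acc i =>
      let start := (PySem.List.slice _pattern none (some i)).reverse
      let «end» := PySem.List.slice _pattern (some i) none
      if ((start.zip «end»).all (fun xy => xy.1 == xy.2)) then acc ++ [i] else acc)
    []

-- ===== PORT B =====
def get_horizontal_mirrors_alt (_pattern : List String) : List Int :=
  let n : Int := _pattern.length
  (PySem.List.pyRange 1 n 1).foldl
    (fun acc i =>
      let seg := if 2 * i ≤ n then PySem.List.slice _pattern none (some (2 * i))
                 else PySem.List.slice _pattern (some (2 * i - n)) none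
      if seg == seg.reverse then acc ++ [i] else acc)
    []

-- ===== PRECONDITION & SPEC =====
def Spec_get_horizontal_mirrors (_pattern : List String) (out : List Int) : Prop := out = get_horizontal_mirrors_alt _pattern
instance (_pattern : List String) (out : List Int) : Decidable (Spec_get_horizontal_mirrors _pattern out) := by unfold Spec_get_horizontal_mirrors; infer_instance

-- ===== CLAIM (what is proved, stated in full; the proofs are below) =====
def Claim_equal_get_horizontal_mirrors : Prop := ∀ (_pattern : List String), Dom_get_horizontal_mirrors _pattern → Spec_get_horizontal_mirrors _pattern (get_horizontal_mirrors _pattern)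

-- ===== LEMMAS AND PROOFS =====

-- zip-all equality is equality of mutual truncations
lemma pv_zip_all_eq {α : Type} [BEq α] [LawfulBEq α] (xs ys : List α) :
    ((xs.zip ys).all (fun xy => xy.1 == xy.2)) = (xs.take ys.length == ys.take xs.length) := by
  induction xs generalizing ys with
  | nil => simp
  | cons a xs ih =>
    cases ys with
    | nil => simp
    | cons b ys =>
      simp only [List.zip_cons_cons, List.all_cons, List.length_cons, List.take_succ_cons, ih]
      by_cases h : a = b <;> simp [h]

-- a balanced even split is a palindrome iff the right half mirrors the left
lemma pv_balanced_palindrome {α : Type} (u v : List α) (h : u.length = v.length) :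
    (u ++ v = (u ++ v).reverse) ↔ v = u.reverse := by
  rw [List.reverse_append]
  constructor
  · intro he
    exact (List.append_inj he (by simp [h])).2
  · intro hv
    subst hv; simp

-- the two membership conditions coincide for any index k < length
lemma pv_cond_eq {α : Type} [BEq α] [LawfulBEq α] (p : List α) (k : Nat) (hk : k < p.length) :
    (((p.take k).reverse.zip (p.drop k)).all (fun xy => xy.1 == xy.2)) =
    ((if 2 * k ≤ p.length then p.take (2 * k) else p.drop (2 * k - p.length)) ==
     (if 2 * k ≤ p.length then p.take (2 * k) else p.drop (2 * k - p.length)).reverse) := by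
  have hlen_take : (p.take k).length = k := by simp; omega
  rw [pv_zip_all_eq, Bool.eq_iff_iff]
  simp only [beq_iff_eq]
  by_cases hcase : 2 * k ≤ p.length
  · have h1 : ((p.take k).reverse.take (p.drop k).length) = (p.take k).reverse := by
      apply List.take_of_length_le; simp; omega
    have h2 : (p.drop k).take (p.take k).reverse.length = (p.drop k).take k := by
      simp [hlen_take]
    rw [h1, h2]
    simp only [hcase, if_pos]
    have hseg : p.take (2 * k) = p.take k ++ (p.drop k).take k := by
      rw [← List.take_add]; congr 1; omega
    rw [hseg, pv_balanced_palindrome _ _ (by simp [hlen_take]; omega)]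
    exact ⟨fun h => h.symm, fun h => h.symm⟩
  · have h2 : (p.drop k).take (p.take k).reverse.length = p.drop k := by
      apply List.take_of_length_le; simp [hlen_take]; omega
    rw [h2]
    simp only [hcase, if_neg, not_false_iff]
    have hsplit : p.drop (2 * k - p.length) = (p.take k).drop (2 * k - p.length) ++ p.drop k := by
      rw [← List.drop_append_of_le_length (by simp [hlen_take]; omega), List.take_append_drop]
    have hlen2 : ((p.take k).drop (2 * k - p.length)).length = (p.drop k).length := by
      simp [hlen_take]; omega
    rw [hsplit, pv_balanced_palindrome _ _ hlen2]
    have hrev : (p.take k).reverse.take (p.drop k).length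
        = ((p.take k).drop (2 * k - p.length)).reverse := by
      rw [List.take_reverse]; congr 1; simp [hlen_take]; omega
    rw [hrev]
    exact ⟨fun h => h.symm, fun h => h.symm⟩

-- ===== VERDICT (by name: the statement is the Claim_ definition above) =====
theorem get_horizontal_mirrors_spec : Claim_equal_get_horizontal_mirrors := by
  intro p _
  unfold Spec_get_horizontal_mirrors get_horizontal_mirrors get_horizontal_mirrors_alt
  apply PySem.List.foldl_congr_mem
  intro acc i hi
  rw [PySem.List.mem_pyRange_one] at hi
  have h0 : 0 ≤ i := by omega
  set k := i.toNat with hkdef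
  have hik : i = (k : Int) := by omega
  have hk : k < p.length := by omega
  simp only [hik]
  rw [PySem.List.slice_to p (by positivity), PySem.List.slice_from p (by positivity)]
  by_cases h2 : 2 * (k : Int) ≤ (p.length : Int)
  · have h2n : 2 * k ≤ p.length := by omega
    have ht : (2 * (k : Int)).toNat = 2 * k := by omega
    simp only [Int.toNat_natCast, if_pos h2,
      PySem.List.slice_to p (show (0:Int) ≤ 2 * (k:Int) by positivity), ht,
      pv_cond_eq p k hk, if_pos h2n]
  · have h2n : ¬ (2 * k ≤ p.length) := by omega
    have ht : (2 * (k : Int) - (p.length : Int)).toNat = 2 * k - p.length := by omega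
    simp only [Int.toNat_natCast, if_neg h2,
      PySem.List.slice_from p (show (0:Int) ≤ 2 * (k:Int) - (p.length:Int) by omega), ht,
      pv_cond_eq p k hk, if_neg h2n]
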